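-- pv_equiv track=rewrite | github.com/batmanstooge/jrd-dxi | pandas_processor.py | get_players_who_played_for_team_from_all_players_dict_and_index_of_first_player
-- ===== SOURCE A (Python) =====
-- def get_players_who_played_for_team_from_all_players_dict_and_index_of_first_player(team_name, all_players_dict):
--     players_who_have_already_played_for_team = []
--     index_of_first_player = -1
--     for index, player in enumerate(all_players_dict):
--         player_team_name = player["team_name"]
--         if player_team_name == team_name:
--             if index_of_first_player == -1:
--                 index_of_first_player = index
--             players_who_have_already_played_for_team.append(player)
--     index_and_players_who_have_already_played_for_team = (
--         index_of_first_player, players_who_have_already_played_for_team)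
--     return index_and_players_who_have_already_played_for_team
-- ===== SOURCE B (Python) =====
-- def get_players_who_played_for_team_from_all_players_dict_and_index_of_first_player(team_name, all_players_dict):
--     index_of_first_player = next(
--         (i for i, p in enumerate(all_players_dict) if p["team_name"] == team_name),
--         -1)
--     players_who_have_already_played_for_team = [
--         p for p in all_players_dict if p["team_name"] == team_name]
--     return (index_of_first_player, players_who_have_already_played_for_team)
-- ===== Notes on version B (the rewrite author's own statement) =====
-- stated objective: simpler
-- what changed: Replaces the single interleaved loop with mutable sentinel-flag index tracking by two independent declarative passes: next() over enumerate for the first matching index (default -1) and a comprehension for the filtered list.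
import Mathlib
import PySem

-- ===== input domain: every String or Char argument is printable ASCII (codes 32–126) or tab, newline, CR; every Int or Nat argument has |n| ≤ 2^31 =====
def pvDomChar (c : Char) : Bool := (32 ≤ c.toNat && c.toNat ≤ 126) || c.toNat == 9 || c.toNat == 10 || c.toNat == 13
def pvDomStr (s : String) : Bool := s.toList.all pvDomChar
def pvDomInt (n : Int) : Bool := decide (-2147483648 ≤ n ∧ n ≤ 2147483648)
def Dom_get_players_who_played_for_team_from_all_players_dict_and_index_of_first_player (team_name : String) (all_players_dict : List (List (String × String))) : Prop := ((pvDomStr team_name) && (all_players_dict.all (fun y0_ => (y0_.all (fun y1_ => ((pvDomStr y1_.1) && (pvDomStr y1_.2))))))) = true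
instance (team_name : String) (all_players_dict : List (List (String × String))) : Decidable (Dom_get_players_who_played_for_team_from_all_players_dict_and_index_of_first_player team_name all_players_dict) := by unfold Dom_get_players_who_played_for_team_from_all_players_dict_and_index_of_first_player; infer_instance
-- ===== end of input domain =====

-- B replaces A's single interleaved sentinel-tracking loop by two independent passes
-- (find-first-index with default -1, and a filter); objective: simpler.


-- player["team_name"]: first-match association-list lookup (none = KeyError, excluded by Pre_)
def pvTeamOf (p : List (String × String)) : Option String :=
  (p.find? (fun kv => kv.1 == "team_name")).map (·.2)

-- ===== PORT A =====
-- one loop over enumerate, carrying (index_of_first_player, accumulated players)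
def get_players_who_played_for_team_from_all_players_dict_and_index_of_first_player (team_name : String) (all_players_dict : List (List (String × String))) : Int × (List (List (String × String))) :=
  (PySem.List.enumerate all_players_dict).foldl
    (fun s ip =>
      if pvTeamOf ip.2 == some team_name then
        ((if s.1 == (-1 : Int) then ip.1 else s.1), s.2 ++ [ip.2])
      else s)
    ((-1 : Int), [])

-- ===== PORT B =====
-- two independent passes: next(( i for i,p in enumerate(...) if ...), -1) and a comprehension
def get_players_who_played_for_team_from_all_players_dict_and_index_of_first_player_alt (team_name : String) (all_players_dict : List (List (String × String))) : Int × (List (List (String × String))) :=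
  let index_of_first_player : Int :=
    match (PySem.List.enumerate all_players_dict).find? (fun ip => pvTeamOf ip.2 == some team_name) with
    | some ip => ip.1
    | none => -1
  let players := all_players_dict.filter (fun p => pvTeamOf p == some team_name)
  (index_of_first_player, players)

-- ===== PRECONDITION & SPEC =====
-- Pre_ excludes exactly the inputs where some player dict lacks the key "team_name":
-- there both Pythons raise KeyError.
def Pre_get_players_who_played_for_team_from_all_players_dict_and_index_of_first_player (team_name : String) (all_players_dict : List (List (String × String))) : Prop :=
  all_players_dict.all (fun p => p.any (fun kv => kv.1 == "team_name")) = true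
instance (team_name : String) (all_players_dict : List (List (String × String))) : Decidable (Pre_get_players_who_played_for_team_from_all_players_dict_and_index_of_first_player team_name all_players_dict) := by unfold Pre_get_players_who_played_for_team_from_all_players_dict_and_index_of_first_player; infer_instance

def pvWitness_get_players_who_played_for_team_from_all_players_dict_and_index_of_first_player : String × (List (List (String × String))) :=
  ("A", [[("team_name", "A")], [("team_name", "B")]])

def Spec_get_players_who_played_for_team_from_all_players_dict_and_index_of_first_player (team_name : String) (all_players_dict : List (List (String × String))) (out : Int × (List (List (String × String)))) : Prop := out = get_players_who_played_for_team_from_all_players_dict_and_index_of_first_player_alt team_name all_players_dict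
instance (team_name : String) (all_players_dict : List (List (String × String))) (out : Int × (List (List (String × String)))) : Decidable (Spec_get_players_who_played_for_team_from_all_players_dict_and_index_of_first_player team_name all_players_dict out) := by unfold Spec_get_players_who_played_for_team_from_all_players_dict_and_index_of_first_player; infer_instance

-- ===== CLAIM (what is proved, stated in full; the proofs are below) =====
def Claim_equal_get_players_who_played_for_team_from_all_players_dict_and_index_of_first_player : Prop := ∀ (team_name : String) (all_players_dict : List (List (String × String))), Dom_get_players_who_played_for_team_from_all_players_dict_and_index_of_first_player team_name all_players_dict → Pre_get_players_who_played_for_team_from_all_players_dict_and_index_of_first_player team_name all_players_dict → Spec_get_players_who_played_for_team_from_all_players_dict_and_index_of_first_player team_name all_players_dict (get_players_who_played_for_team_from_all_players_dict_and_index_of_first_player team_name all_players_dict)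

-- ===== LEMMAS AND PROOFS =====

-- once the first index is set (i ≠ -1), A's loop only appends matches
lemma foldl_enum_of_ne (q : List (String × String) → Bool) (xs : List (List (String × String)))
    (n : Int) (i : Int) (acc : List (List (String × String))) (hi : i ≠ -1) :
    (PySem.List.enumerate xs n).foldl
      (fun s ip =>
        if q ip.2 then
          ((if s.1 == (-1 : Int) then ip.1 else s.1), s.2 ++ [ip.2])
        else s) (i, acc)
    = (i, acc ++ xs.filter q) := by
  induction xs generalizing n acc with
  | nil => simp [PySem.List.enumerate_nil]
  | cons x xs ih =>
    rw [PySem.List.enumerate_cons]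
    simp only [List.foldl_cons, List.filter_cons]
    by_cases h : q x
    · have hib : (i == (-1 : Int)) = false := by simpa using hi
      simp only [h, if_true, hib, Bool.false_eq_true, if_false, ih (n + 1), List.append_assoc,
        List.singleton_append]
    · simp only [h, Bool.false_eq_true, if_false, ih (n + 1)]

-- while the index is still -1, A's loop computes B's find?-index and B's filter
lemma foldl_enum_unset (q : List (String × String) → Bool) (xs : List (List (String × String)))
    (n : Nat) (acc : List (List (String × String))) :
    (PySem.List.enumerate xs (n : Int)).foldl
      (fun s ip =>
        if q ip.2 then
          ((if s.1 == (-1 : Int) then ip.1 else s.1), s.2 ++ [ip.2])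
        else s) ((-1 : Int), acc)
    = ((match (PySem.List.enumerate xs (n : Int)).find? (fun ip => q ip.2) with
        | some ip => ip.1
        | none => -1),
       acc ++ xs.filter q) := by
  induction xs generalizing n acc with
  | nil => simp [PySem.List.enumerate_nil]
  | cons x xs ih =>
    rw [PySem.List.enumerate_cons]
    simp only [List.foldl_cons, List.find?_cons, List.filter_cons]
    by_cases h : q x
    · have hne : ((n : Int) ≠ -1) := by omega
      simp only [h, if_true, beq_self_eq_true, ite_true]
      rw [show ((n : Int) + 1) = ((n + 1 : Nat) : Int) by push_cast; ring]
      simp only [foldl_enum_of_ne q xs ((n + 1 : Nat) : Int) (n : Int) (acc ++ [x]) hne,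
        List.append_assoc, List.singleton_append]
    · simp only [h, Bool.false_eq_true, if_false]
      rw [show ((n : Int) + 1) = ((n + 1 : Nat) : Int) by push_cast; ring]
      simp only [ih (n + 1)]

-- ===== VERDICT (by name: the statement is the Claim_ definition above) =====
theorem get_players_who_played_for_team_from_all_players_dict_and_index_of_first_player_spec : Claim_equal_get_players_who_played_for_team_from_all_players_dict_and_index_of_first_player := by
  intro team xs _ _
  unfold Spec_get_players_who_played_for_team_from_all_players_dict_and_index_of_first_player
  unfold get_players_who_played_for_team_from_all_players_dict_and_index_of_first_player
  unfold get_players_who_played_for_team_from_all_players_dict_and_index_of_first_player_alt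
  have := foldl_enum_unset (fun p => pvTeamOf p == some team) xs 0 []
  simpa using this
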